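-- pv_equiv track=rewrite | github.com/BobbyCats/ai-dev-runtime-protocol | src/aidrp/engineering_review.py | _default_validation_commands
-- ===== SOURCE A (Python) =====
-- from typing import Any
--
-- def _default_validation_commands(repo_map: dict[str, Any]) -> list[str]:
--     commands = []
--     summary_commands = repo_map.get("summary", {}).get("commands", {})
--     for group in ("python", "npm", "make"):
--         for command in summary_commands.get(group, []):
--             if command not in commands:
--                 commands.append(command)
--     if "python -m unittest discover -s tests -v" not in commands:
--         commands.append("python -m unittest discover -s tests -v")
--     return commands[:6]
-- ===== SOURCE B (Python) =====
-- def _default_validation_commands(repo_map):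
--     sc = repo_map.get("summary", {}).get("commands", {})
--     stream = (list(sc.get("python", [])) + list(sc.get("npm", []))
--               + list(sc.get("make", []))
--               + ["python -m unittest discover -s tests -v"])
--
--     def first_six(rest, acc):
--         # recursion on the stream; stops as soon as six distinct commands are held
--         if not rest or len(acc) == 6:
--             return acc
--         head = rest[0]
--         return first_six(rest[1:], acc if head in acc else acc + [head])
--
--     return first_six(stream, [])
-- ===== Notes on version B (the rewrite author's own statement) =====
-- stated objective: alternative
-- what changed: Replaces A's nested group loops with guarded appends plus a final slice by flattening the three groups and the fallback into one stream and recursing over it, halting the recursion as soon as six distinct commands are collected, so no final slice is needed.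
import Mathlib
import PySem

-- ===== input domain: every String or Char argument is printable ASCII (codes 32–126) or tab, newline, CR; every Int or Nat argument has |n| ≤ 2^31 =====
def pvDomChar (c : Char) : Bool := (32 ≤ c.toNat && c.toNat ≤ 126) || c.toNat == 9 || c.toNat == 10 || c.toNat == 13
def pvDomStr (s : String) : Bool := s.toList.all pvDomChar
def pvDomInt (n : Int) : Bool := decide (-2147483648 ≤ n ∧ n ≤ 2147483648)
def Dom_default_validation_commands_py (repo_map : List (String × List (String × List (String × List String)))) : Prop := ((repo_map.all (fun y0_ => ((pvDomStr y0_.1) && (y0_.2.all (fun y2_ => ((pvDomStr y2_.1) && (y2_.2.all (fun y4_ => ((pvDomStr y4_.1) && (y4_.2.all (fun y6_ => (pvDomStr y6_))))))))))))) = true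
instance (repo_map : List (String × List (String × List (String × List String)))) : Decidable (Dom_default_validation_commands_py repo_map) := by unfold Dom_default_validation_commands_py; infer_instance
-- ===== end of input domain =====

-- B flattens the groups plus the fallback into one stream and recurses over it with an
-- early stop at six distinct commands, instead of A's nested guarded-append loops + slice.

-- ===== PORT A =====
def default_validation_commands_py (repo_map : List (String × List (String × List (String × List String)))) : List String :=
  let summary_commands := PySem.Dict.getD ⟨PySem.Dict.getD ⟨repo_map⟩ "summary" []⟩ "commands" []
  let commands := (["python", "npm", "make"] : List String).foldl
    (fun commands group =>
      (PySem.Dict.getD ⟨summary_commands⟩ group []).foldl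
        (fun commands command =>
          if commands.contains command then commands else commands ++ [command]) commands) []
  let commands :=
    if commands.contains "python -m unittest discover -s tests -v" then commands
    else commands ++ ["python -m unittest discover -s tests -v"]
  PySem.List.slice commands none (some 6)

-- ===== PORT B =====
-- recursion of Source B's first_six: stop on empty stream or six collected commands
def pvFirstSix : List String → List String → List String
  | [], acc => acc
  | head :: tail, acc =>
    if acc.length = 6 then acc
    else pvFirstSix tail (if acc.contains head then acc else acc ++ [head])

def default_validation_commands_py_alt (repo_map : List (String × List (String × List (String × List String)))) : List String :=
  let sc := PySem.Dict.getD ⟨PySem.Dict.getD ⟨repo_map⟩ "summary" []⟩ "commands" []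
  let stream := PySem.Dict.getD ⟨sc⟩ "python" [] ++ PySem.Dict.getD ⟨sc⟩ "npm" []
      ++ PySem.Dict.getD ⟨sc⟩ "make" []
      ++ ["python -m unittest discover -s tests -v"]
  pvFirstSix stream []

-- ===== PRECONDITION & SPEC =====
def Spec_default_validation_commands_py (repo_map : List (String × List (String × List (String × List String)))) (out : List String) : Prop := out = default_validation_commands_py_alt repo_map
instance (repo_map : List (String × List (String × List (String × List String)))) (out : List String) : Decidable (Spec_default_validation_commands_py repo_map out) := by unfold Spec_default_validation_commands_py; infer_instance

-- ===== CLAIM (what is proved, stated in full; the proofs are below) =====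
def Claim_equal_default_validation_commands_py : Prop := ∀ (repo_map : List (String × List (String × List (String × List String)))), Dom_default_validation_commands_py repo_map → Spec_default_validation_commands_py repo_map (default_validation_commands_py repo_map)

-- ===== LEMMAS AND PROOFS =====

def pvGApp (acc : List String) (c : String) : List String :=
  if acc.contains c then acc else acc ++ [c]

lemma pvFirstSix_cons (hd : String) (t acc : List String) :
    pvFirstSix (hd :: t) acc = if acc.length = 6 then acc else pvFirstSix t (pvGApp acc hd) := rfl

lemma foldl_gApp_prefix (l acc : List String) : ∃ e, l.foldl pvGApp acc = acc ++ e := by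
  induction l generalizing acc with
  | nil => exact ⟨[], by simp⟩
  | cons h t ih =>
    obtain ⟨e, he⟩ := ih (pvGApp acc h)
    rw [List.foldl_cons, he]
    unfold pvGApp
    split
    · exact ⟨e, rfl⟩
    · exact ⟨h :: e, by simp⟩

lemma firstSix_eq_foldl_take (l acc : List String) (h : acc.length ≤ 6) :
    pvFirstSix l acc = (l.foldl pvGApp acc).take 6 := by
  induction l generalizing acc with
  | nil => simp [pvFirstSix, List.take_of_length_le h]
  | cons hd t ih =>
    by_cases h6 : acc.length = 6
    · obtain ⟨e, he⟩ := foldl_gApp_prefix (hd :: t) acc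
      rw [he, List.take_append_of_le_length (by omega), List.take_of_length_le h]
      unfold pvFirstSix
      rw [if_pos h6]
    · have hlt : acc.length < 6 := lt_of_le_of_ne h h6
      have hlen : (pvGApp acc hd).length ≤ 6 := by
        unfold pvGApp; split
        · exact h
        · simp; omega
      rw [pvFirstSix_cons, if_neg h6, List.foldl_cons]
      exact ih _ hlen

-- ===== VERDICT (by name: the statement is the Claim_ definition above) =====
theorem default_validation_commands_py_spec : Claim_equal_default_validation_commands_py := by
  intro repo_map _
  unfold Spec_default_validation_commands_py
  simp only [default_validation_commands_py, default_validation_commands_py_alt]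
  rw [firstSix_eq_foldl_take _ _ (by simp)]
  rw [show ((6:Int) : Option Int) = some ((6:Nat) : Int) from by norm_num]
  rw [PySem.List.slice_to_natCast]
  simp only [List.foldl_append, List.foldl_cons, List.foldl_nil]
  rfl
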